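-- pv_equiv track=rewrite | github.com/stakiran/todaros | todaros.py | reconstruction_tasklines_with_extract_merge
-- ===== SOURCE A (Python) =====
-- import copy
--
-- def reconstruction_tasklines_with_extract_merge(lines):
--     # extract and merge
--     # 指定観点で抽出(extact)した部分リストをつくったあと、
--     # それらを指定順序で併合(merge)することで
--     # 意図した並びのリストをつくる手法.
--
--     outlines = []
--
--     extractee = copy.deepcopy(lines)
--     prefix_extracters = [
--         '0 ',
--         '1 ',
--         '2 ',
--         '3 ',
--         '4 ',
--         '5 ',
--         '6 ',
--         '7 ',
--         '8 ',
--         '9 ',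
--     ]
--
--     for prefix_extracter in prefix_extracters:
--         extracted_lines = []
--         for line in extractee:
--             not_included = not line.startswith(prefix_extracter)
--             if not_included:
--                 continue
--             extracted_lines.append(line)
--
--         outlines.extend(extracted_lines)
--
--         for extracted_line in extracted_lines:
--             extractee.remove(extracted_line)
--
--     # 最後に「抽出されなかった行たち」を merge する必要がある。
--     # これを行いたいがために、上記処理では extractee を破壊的に remove していっている。
--     not_extracted_lines = extractee
--     outlines.extend(not_extracted_lines)
--
--     return outlines
-- ===== SOURCE B (Python) =====
-- def reconstruction_tasklines_with_extract_merge(lines):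
--     # single-pass stable bucket partition: 10 digit buckets + leftover, then concatenate
--     buckets = [[] for _ in range(11)]
--     for line in lines:
--         if len(line) >= 2 and line[1] == ' ' and '0' <= line[0] <= '9':
--             buckets[ord(line[0]) - 48].append(line)
--         else:
--             buckets[10].append(line)
--     out = []
--     for b in buckets:
--         out += b
--     return out
-- ===== Notes on version B (the rewrite author's own statement) =====
-- stated objective: faster
-- what changed: Replaced A's ten outer passes (each scanning the remaining list and then removing every extracted line with list.remove, which rescans the list per removal) by a single pass distributing each line into one of 10 digit buckets or a leftover bucket, then concatenating the 11 buckets.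
import Mathlib
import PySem

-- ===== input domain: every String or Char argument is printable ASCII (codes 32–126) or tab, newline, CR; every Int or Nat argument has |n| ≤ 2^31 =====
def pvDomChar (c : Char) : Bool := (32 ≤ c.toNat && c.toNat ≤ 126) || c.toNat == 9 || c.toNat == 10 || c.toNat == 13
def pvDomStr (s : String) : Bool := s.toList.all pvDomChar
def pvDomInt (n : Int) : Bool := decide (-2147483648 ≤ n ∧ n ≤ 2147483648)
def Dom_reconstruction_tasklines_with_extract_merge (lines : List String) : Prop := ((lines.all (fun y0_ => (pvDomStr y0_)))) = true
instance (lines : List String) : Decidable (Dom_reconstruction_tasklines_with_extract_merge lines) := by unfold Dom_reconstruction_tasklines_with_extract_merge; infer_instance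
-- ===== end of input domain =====

-- B replaces A's ten extract-and-remove passes over the shrinking list by one pass that
-- distributes each line into 10 digit buckets plus a leftover bucket, then concatenates.


-- ===== PORT A =====
-- one iteration of A's outer loop: extract lines starting with pfx, append them to
-- outlines, and remove each extracted line (first occurrence) from extractee
def pvStepA (st : List String × List String) (pfx : String) : List String × List String :=
  let extracted := st.2.foldl (fun acc line =>
      if !(PySem.Str.startswith line pfx) then acc else acc ++ [line]) []
  (st.1 ++ extracted,
   extracted.foldl (fun ex el => (PySem.List.remove? ex el).getD ex) st.2)
  -- `.getD ex`: list.remove would raise ValueError only if el ∉ ex, which never happens here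

def reconstruction_tasklines_with_extract_merge (lines : List String) : List String :=
  let prefix_extracters := ["0 ", "1 ", "2 ", "3 ", "4 ", "5 ", "6 ", "7 ", "8 ", "9 "]
  let r := prefix_extracters.foldl pvStepA ([], lines)
  r.1 ++ r.2

-- ===== PORT B =====
-- bucket index of a line: 0..9 for a leading "<digit> ", 10 otherwise (B's classifier)
def pvBucketIdxL : List Char → Nat
  | c0 :: c1 :: _ => if c1 = ' ' ∧ '0' ≤ c0 ∧ c0 ≤ '9' then c0.toNat - 48 else 10
  | _ => 10

def pvBucketIdx (line : String) : Nat := pvBucketIdxL line.toList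

def reconstruction_tasklines_with_extract_merge_alt (lines : List String) : List String :=
  let buckets := lines.foldl
    (fun bs line => bs.modify (pvBucketIdx line) (· ++ [line]))
    [[], [], [], [], [], [], [], [], [], [], []]
  buckets.foldl (fun out b => out ++ b) []

-- ===== PRECONDITION & SPEC =====
def Spec_reconstruction_tasklines_with_extract_merge (lines : List String) (out : List String) : Prop := out = reconstruction_tasklines_with_extract_merge_alt lines
instance (lines : List String) (out : List String) : Decidable (Spec_reconstruction_tasklines_with_extract_merge lines out) := by unfold Spec_reconstruction_tasklines_with_extract_merge; infer_instance

-- ===== CLAIM (what is proved, stated in full; the proofs are below) =====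
def Claim_equal_reconstruction_tasklines_with_extract_merge : Prop := ∀ (lines : List String), Dom_reconstruction_tasklines_with_extract_merge lines → Spec_reconstruction_tasklines_with_extract_merge lines (reconstruction_tasklines_with_extract_merge lines)

-- ===== LEMMAS AND PROOFS =====

-- q d s: s starts with "<d> "
def pvQ (d : Char) (s : String) : Bool := PySem.Str.startswith s (String.ofList [d, ' '])

theorem pvQ_iff (d : Char) (s : String) : pvQ d s = true ↔ ∃ t, s.toList = d :: ' ' :: t := by
  unfold pvQ
  rw [PySem.Str.startswith_eq, PySem.Chars.startswith_iff]
  constructor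
  · intro h
    rcases h with ⟨t, ht⟩
    exact ⟨t, by simpa using ht.symm⟩
  · rintro ⟨t, ht⟩
    exact ⟨t, by simp [ht]⟩

theorem pvQ_disj {d d' : Char} (h : d ≠ d') {s : String} (hq : pvQ d s = true) :
    pvQ d' s = false := by
  rcases (pvQ_iff d s).mp hq with ⟨t, ht⟩
  rw [Bool.eq_false_iff]
  intro hq'
  rcases (pvQ_iff d' s).mp hq' with ⟨t', ht'⟩
  rw [ht] at ht'
  exact h (by injection ht')

-- A's inner extraction loop builds the stable filter
theorem pv_foldl_extract (p : String → Bool) (l acc : List String) :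
    l.foldl (fun a x => if !(p x) then a else a ++ [x]) acc = acc ++ l.filter p := by
  induction l generalizing acc with
  | nil => simp
  | cons x l ih =>
    rw [List.foldl_cons]
    cases hp : p x
    · rw [List.filter_cons_of_neg (by simp [hp])]
      show List.foldl (fun a x => if (!(p x)) = true then a else a ++ [x]) acc l
          = acc ++ List.filter p l
      exact ih acc
    · rw [List.filter_cons_of_pos (by simp [hp])]
      show List.foldl (fun a x => if (!(p x)) = true then a else a ++ [x]) (acc ++ [x]) l
          = acc ++ x :: List.filter p l
      rw [ih (acc ++ [x])]
      simp

-- removing one extracted element from a list headed by a non-matching element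
theorem pv_rm_cons {x e : String} (l : List String) (hne : e ≠ x) :
    ((PySem.List.remove? (x :: l) e).getD (x :: l)) = x :: ((PySem.List.remove? l e).getD l) := by
  rw [PySem.List.remove?_cons_of_ne l (fun h => hne h.symm)]
  cases PySem.List.remove? l e
  · simp
  · simp

-- removing, in order, every element of `l.filter p` from `l` leaves `l.filter (!p ·)`
theorem pv_rm_all_aux (p : String → Bool) (ys : List String) (hys : ∀ e ∈ ys, p e = true) :
    ∀ (x : String), p x = false → ∀ (l : List String),
    ys.foldl (fun ex e => (PySem.List.remove? ex e).getD ex) (x :: l)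
      = x :: ys.foldl (fun ex e => (PySem.List.remove? ex e).getD ex) l := by
  induction ys with
  | nil => intro x _ l; rfl
  | cons e ys ih =>
    intro x hx l
    have he : p e = true := hys e (List.mem_cons_self ..)
    have hne : e ≠ x := fun h => by rw [h, hx] at he; exact Bool.false_ne_true he
    simp only [List.foldl_cons]
    rw [pv_rm_cons l hne]
    exact ih (fun e' he' => hys e' (List.mem_cons_of_mem _ he')) x hx _

theorem pv_rm_all (p : String → Bool) (l : List String) :
    (l.filter p).foldl (fun ex e => (PySem.List.remove? ex e).getD ex) l
      = l.filter (fun x => !(p x)) := by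
  induction l with
  | nil => simp
  | cons x l ih =>
    cases hp : p x
    · rw [List.filter_cons_of_neg (by simp [hp])]
      rw [pv_rm_all_aux p (l.filter p) (fun e he => List.of_mem_filter he) x hp l]
      rw [ih, List.filter_cons_of_pos (by simp [hp])]
    · rw [List.filter_cons_of_pos (by simp [hp]), List.foldl_cons,
        PySem.List.remove?_cons_self]
      simp only [Option.getD_some]
      rw [ih, List.filter_cons_of_neg (by simp [hp])]

theorem pvStepA_eq (out ex : List String) (d : Char) :
    pvStepA (out, ex) (String.ofList [d, ' '])
      = (out ++ ex.filter (pvQ d), ex.filter (fun s => !(pvQ d s))) := by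
  unfold pvStepA pvQ
  simp only [pv_foldl_extract, List.nil_append]
  rw [pv_rm_all]

theorem pv_filter_filter_of_imp (p r : String → Bool) (h : ∀ s, p s = true → r s = true)
    (l : List String) : (l.filter r).filter p = l.filter p := by
  rw [List.filter_filter]
  apply List.filter_congr
  intro a _
  cases hp : p a
  · simp
  · simp [h a hp]

-- the whole outer loop over distinct digit prefixes
theorem pv_foldA (ds : List Char) (hnd : ds.Nodup) (out ex : List String) :
    (ds.map (fun d => String.ofList [d, ' '])).foldl pvStepA (out, ex)
      = (out ++ (ds.map (fun d => ex.filter (pvQ d))).flatten,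
         ex.filter (fun s => ds.all (fun d => !(pvQ d s)))) := by
  induction ds generalizing out ex with
  | nil => simp
  | cons d ds ih =>
    simp only [List.map_cons, List.foldl_cons, pvStepA_eq]
    rw [ih (List.Nodup.of_cons hnd)]
    have hmem : ∀ d' ∈ ds, (ex.filter (fun s => !(pvQ d s))).filter (pvQ d')
        = ex.filter (pvQ d') := by
      intro d' hd'
      apply pv_filter_filter_of_imp
      intro s hs
      have hne : d' ≠ d := fun h => (List.nodup_cons.mp hnd).1 (h ▸ hd')
      simp [pvQ_disj hne hs]
    rw [Prod.mk.injEq]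
    refine ⟨?_, ?_⟩
    · rw [List.map_congr_left hmem]
      simp [List.append_assoc]
    · rw [List.filter_filter]
      apply List.filter_congr
      intro a _
      cases hq : pvQ d a <;> simp [List.all_cons, hq]

def pvDigits : List Char := ['0', '1', '2', '3', '4', '5', '6', '7', '8', '9']

theorem pvA_canon (lines : List String) :
    reconstruction_tasklines_with_extract_merge lines
      = (pvDigits.map (fun d => lines.filter (pvQ d))).flatten
        ++ lines.filter (fun s => pvDigits.all (fun d => !(pvQ d s))) := by
  show (List.foldl pvStepA ([], lines) (pvDigits.map (fun d => String.ofList [d, ' ']))).1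
      ++ (List.foldl pvStepA ([], lines) (pvDigits.map (fun d => String.ofList [d, ' ']))).2 = _
  rw [show List.foldl pvStepA ([], lines) (pvDigits.map (fun d => String.ofList [d, ' ']))
      = (pvDigits.map (fun d => String.ofList [d, ' '])).foldl pvStepA ([], lines) from rfl,
    pv_foldA pvDigits (by decide) [] lines]
  rfl

-- ===== B side =====

theorem pv_charLe (a b : Char) : a ≤ b ↔ a.toNat ≤ b.toNat := by
  rw [Char.le_def, UInt32.le_iff_toNat_le]; rfl

theorem pvBucketIdxL_lt (l : List Char) : pvBucketIdxL l < 11 := by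
  match l with
  | [] => simp [pvBucketIdxL]
  | [c] => simp [pvBucketIdxL]
  | c0 :: c1 :: t =>
    simp only [pvBucketIdxL]
    split
    · rename_i h
      have h1 := (pv_charLe '0' c0).mp h.2.1
      have h2 := (pv_charLe c0 '9').mp h.2.2
      have e0 : ('0' : Char).toNat = 48 := rfl
      have e9 : ('9' : Char).toNat = 57 := rfl
      omega
    · omega

theorem pvBucketIdx_lt (s : String) : pvBucketIdx s < 11 :=
  pvBucketIdxL_lt s.toList

theorem pv_modify_getD (bs : List (List String)) (j i : Nat) (f : List String → List String)
    (hi : i < bs.length) :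
    (bs.modify j f).getD i [] = if i = j then f (bs.getD i []) else bs.getD i [] := by
  by_cases h : i = j
  · subst h
    simp [List.getD, List.getElem?_eq_getElem hi]
  · simp [List.getD, List.getElem?_eq_getElem hi, Ne.symm h, h]

theorem pv_getD_map_range (bs : List (List String)) :
    (List.range bs.length).map (fun i => bs.getD i []) = bs := by
  apply List.ext_getElem
  · simp
  · intro i h1 h2
    simp [List.getD, List.getElem?_eq_getElem (by simpa using h2)]

theorem pvB_inv (lines : List String) : ∀ (bs : List (List String)), bs.length = 11 →
    lines.foldl (fun bs line => bs.modify (pvBucketIdx line) (· ++ [line])) bs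
      = (List.range 11).map (fun i => bs.getD i [] ++ lines.filter (fun s => pvBucketIdx s == i)) := by
  induction lines with
  | nil =>
    intro bs hbs
    simp only [List.foldl_nil, List.filter_nil, List.append_nil]
    rw [← hbs, pv_getD_map_range]
  | cons x ls ih =>
    intro bs hbs
    rw [List.foldl_cons, ih _ (by simp [hbs])]
    apply List.map_congr_left
    intro i hi
    have hi11 : i < 11 := by simpa using List.mem_range.mp hi
    rw [pv_modify_getD bs (pvBucketIdx x) i _ (by omega)]
    by_cases h : i = pvBucketIdx x
    · subst h
      simp [List.append_assoc]
    · have : (pvBucketIdx x == i) = false := by simp; omega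
      simp [h, this]

theorem pv_foldl_append (l : List (List String)) (acc : List String) :
    l.foldl (fun out b => out ++ b) acc = acc ++ l.flatten := by
  induction l generalizing acc with
  | nil => simp
  | cons b l ih => simp [List.foldl_cons, ih, List.append_assoc]

theorem pvB_canon (lines : List String) :
    reconstruction_tasklines_with_extract_merge_alt lines
      = ((List.range 11).map (fun i => lines.filter (fun s => pvBucketIdx s == i))).flatten := by
  unfold reconstruction_tasklines_with_extract_merge_alt
  rw [pvB_inv lines _ rfl, pv_foldl_append, List.nil_append]
  refine congrArg List.flatten (List.map_congr_left ?_)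
  intro i hi
  have hi11 : i < 11 := List.mem_range.mp hi
  interval_cases i <;> rfl

-- pointwise characterizations of the bucket index
theorem pv_idx_digit (c : Char) (hc : 48 ≤ c.toNat ∧ c.toNat ≤ 57) (s : String) :
    (pvBucketIdx s == c.toNat - 48) = pvQ c s := by
  unfold pvBucketIdx
  rcases hls : s.toList with _ | ⟨c0, _ | ⟨c1, t⟩⟩ <;> simp only [pvBucketIdxL]
  · have : pvQ c s = false := by
      rw [Bool.eq_false_iff]; intro h
      rcases (pvQ_iff c s).mp h with ⟨t, ht⟩; rw [hls] at ht; cases ht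
    rw [this, beq_eq_false_iff_ne]
    show (10 : Nat) ≠ c.toNat - 48
    omega
  · have : pvQ c s = false := by
      rw [Bool.eq_false_iff]; intro h
      rcases (pvQ_iff c s).mp h with ⟨t, ht⟩; rw [hls] at ht; cases ht
    rw [this, beq_eq_false_iff_ne]
    show (10 : Nat) ≠ c.toNat - 48
    omega
  · by_cases hcond : c1 = ' ' ∧ '0' ≤ c0 ∧ c0 ≤ '9'
    · rw [if_pos hcond]
      by_cases hce : c0 = c
      · subst hce
        have : pvQ c0 s = true := (pvQ_iff c0 s).mpr ⟨t, by rw [hls, hcond.1]⟩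
        rw [this]; simp
      · have : pvQ c s = false := by
          rw [Bool.eq_false_iff]; intro h
          rcases (pvQ_iff c s).mp h with ⟨t', ht'⟩
          rw [hls] at ht'
          exact hce (by injection ht')
        rw [this, beq_eq_false_iff_ne]
        intro heq
        have h48' : 48 ≤ c0.toNat := by
          have := (pv_charLe '0' c0).mp hcond.2.1
          have e0 : ('0' : Char).toNat = 48 := rfl
          omega
        have h57' : c0.toNat ≤ 57 := by
          have := (pv_charLe c0 '9').mp hcond.2.2
          have e9 : ('9' : Char).toNat = 57 := rfl
          omega
        have ec0 : c0.toNat = c0.val.toNat := rfl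
        have ec : c.toNat = c.val.toNat := rfl
        exact hce (Char.ext (UInt32.toNat_inj.mp (by omega)))
    · rw [if_neg hcond]
      have : pvQ c s = false := by
        rw [Bool.eq_false_iff]; intro h
        rcases (pvQ_iff c s).mp h with ⟨t', ht'⟩
        rw [hls] at ht'
        injection ht' with h1 h2
        injection h2 with h2 _
        apply hcond
        refine ⟨h2, ?_, ?_⟩
        · rw [pv_charLe]
          have e0 : ('0' : Char).toNat = 48 := rfl
          subst h1; omega
        · rw [pv_charLe]
          have e9 : ('9' : Char).toNat = 57 := rfl
          subst h1; omega
      rw [this, beq_eq_false_iff_ne]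
      show (10 : Nat) ≠ c.toNat - 48
      omega

theorem pv_idx_rest (s : String) :
    (pvBucketIdx s == 10) = pvDigits.all (fun d => !(pvQ d s)) := by
  have h0 := pv_idx_digit '0' (by decide) s
  have h1 := pv_idx_digit '1' (by decide) s
  have h2 := pv_idx_digit '2' (by decide) s
  have h3 := pv_idx_digit '3' (by decide) s
  have h4 := pv_idx_digit '4' (by decide) s
  have h5 := pv_idx_digit '5' (by decide) s
  have h6 := pv_idx_digit '6' (by decide) s
  have h7 := pv_idx_digit '7' (by decide) s
  have h8 := pv_idx_digit '8' (by decide) s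
  have h9 := pv_idx_digit '9' (by decide) s
  have hlt := pvBucketIdx_lt s
  simp only [show ('0' : Char).toNat - 48 = 0 from rfl] at h0
  simp only [show ('1' : Char).toNat - 48 = 1 from rfl] at h1
  simp only [show ('2' : Char).toNat - 48 = 2 from rfl] at h2
  simp only [show ('3' : Char).toNat - 48 = 3 from rfl] at h3
  simp only [show ('4' : Char).toNat - 48 = 4 from rfl] at h4
  simp only [show ('5' : Char).toNat - 48 = 5 from rfl] at h5
  simp only [show ('6' : Char).toNat - 48 = 6 from rfl] at h6
  simp only [show ('7' : Char).toNat - 48 = 7 from rfl] at h7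
  simp only [show ('8' : Char).toNat - 48 = 8 from rfl] at h8
  simp only [show ('9' : Char).toNat - 48 = 9 from rfl] at h9
  unfold pvDigits
  simp only [List.all_cons, List.all_nil, Bool.and_true]
  rw [← h0, ← h1, ← h2, ← h3, ← h4, ← h5, ← h6, ← h7, ← h8, ← h9]
  generalize pvBucketIdx s = n at hlt ⊢
  interval_cases n <;> rfl

theorem pv_A_eq_B (lines : List String) :
    reconstruction_tasklines_with_extract_merge lines
      = reconstruction_tasklines_with_extract_merge_alt lines := by
  rw [pvA_canon, pvB_canon]
  have hfe : ∀ (i : Nat) (c : Char), 48 ≤ c.toNat → c.toNat ≤ 57 → c.toNat - 48 = i →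
      lines.filter (fun s => pvBucketIdx s == i) = lines.filter (pvQ c) := by
    intro i c h1 h2 h3
    apply List.filter_congr
    intro s _
    rw [← h3, pv_idx_digit c ⟨h1, h2⟩ s]
  have hrest : lines.filter (fun s => pvBucketIdx s == 10)
      = lines.filter (fun s => pvDigits.all (fun d => !(pvQ d s))) := by
    apply List.filter_congr
    intro s _
    exact pv_idx_rest s
  show _ = (((List.range 11).map _).flatten)
  rw [show List.range 11 = [0,1,2,3,4,5,6,7,8,9,10] from rfl]
  simp only [List.map_cons, List.map_nil]
  rw [hfe 0 '0' (by decide) (by decide) rfl, hfe 1 '1' (by decide) (by decide) rfl,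
      hfe 2 '2' (by decide) (by decide) rfl, hfe 3 '3' (by decide) (by decide) rfl,
      hfe 4 '4' (by decide) (by decide) rfl, hfe 5 '5' (by decide) (by decide) rfl,
      hfe 6 '6' (by decide) (by decide) rfl, hfe 7 '7' (by decide) (by decide) rfl,
      hfe 8 '8' (by decide) (by decide) rfl, hfe 9 '9' (by decide) (by decide) rfl,
      hrest]
  unfold pvDigits
  simp [List.append_assoc]

-- ===== VERDICT (by name: the statement is the Claim_ definition above) =====
theorem reconstruction_tasklines_with_extract_merge_spec : Claim_equal_reconstruction_tasklines_with_extract_merge := by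
  intro lines _
  unfold Spec_reconstruction_tasklines_with_extract_merge
  exact pv_A_eq_B lines
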